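-- pv_equiv track=rewrite | github.com/virajuk/Empires-under-construction | src/utils.py | get_tree_center_from_id
-- ===== SOURCE A (Python) =====
-- import itertools
-- import string
--
-- def get_tree_center_from_id(tree_id, tile_size):
--
--     """
--     Given a tree cell id (e.g. 'aa0'), return its center (x, y) coordinates.
--     Assumes id is two letters + column index, and rows are iterated in order.
--     """
--
--     # Parse row string and col index
--     row_str = tree_id[:2]
--     col_str = tree_id[2:]
--     try:
--         col_idx = int(col_str)
--     except ValueError:
--         return None, None
--     # Find row index by iterating product of ascii_lowercase
--     a = string.ascii_lowercase
--     com = list(itertools.product(a, a))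
--     row_idx = None
--     for idx, tup in enumerate(com):
--         if ''.join(tup) == row_str:
--             row_idx = idx
--             break
--     if row_idx is None:
--         return None, None
--     x = col_idx * tile_size + tile_size // 2
--     y = row_idx * tile_size + tile_size // 2
--     return x, y
-- ===== SOURCE B (Python) =====
-- def get_tree_center_from_id(tree_id, tile_size):
--     """
--     Given a tree cell id (e.g. 'aa0'), return its center (x, y) coordinates.
--     Direct closed-form row index instead of scanning the itertools product.
--     """
--     row_str = tree_id[:2]
--     col_str = tree_id[2:]
--     try:
--         col_idx = int(col_str)
--     except ValueError:
--         return None, None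
--     if len(row_str) != 2 or not ('a' <= row_str[0] <= 'z' and 'a' <= row_str[1] <= 'z'):
--         return None, None
--     row_idx = (ord(row_str[0]) - 97) * 26 + (ord(row_str[1]) - 97)
--     half = tile_size // 2
--     return col_idx * tile_size + half, row_idx * tile_size + half
-- ===== Notes on version B (the rewrite author's own statement) =====
-- stated objective: simpler
-- what changed: Replaces building the 676-element itertools product of lowercase letter pairs and linearly scanning it for the row string with a direct validity check and the closed-form index (ord(c1)-97)*26+(ord(c2)-97).
import Mathlib
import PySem

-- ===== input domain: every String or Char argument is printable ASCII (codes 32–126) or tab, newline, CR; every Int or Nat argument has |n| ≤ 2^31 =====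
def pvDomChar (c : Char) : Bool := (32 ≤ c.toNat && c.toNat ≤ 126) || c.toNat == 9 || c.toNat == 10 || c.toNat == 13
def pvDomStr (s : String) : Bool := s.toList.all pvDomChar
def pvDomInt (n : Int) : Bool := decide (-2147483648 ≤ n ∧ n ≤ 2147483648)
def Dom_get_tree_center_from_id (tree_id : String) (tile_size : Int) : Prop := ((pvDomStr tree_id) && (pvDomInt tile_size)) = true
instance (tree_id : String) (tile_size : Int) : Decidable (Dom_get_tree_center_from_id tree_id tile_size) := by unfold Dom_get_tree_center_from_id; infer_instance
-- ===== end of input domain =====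

-- B replaces A's build-and-scan over the 676 lowercase letter pairs by a closed-form
-- row index computed from the two character codes; the column parsing and the
-- coordinate arithmetic are unchanged (objective: simpler).

-- ===== PORT A =====

-- a = string.ascii_lowercase
def pvAz : List Char := "abcdefghijklmnopqrstuvwxyz".toList

-- com = list(itertools.product(a, a))
def pvCom : List (Char × Char) := pvAz.flatMap (fun x => pvAz.map (fun y => (x, y)))

-- the "for idx, tup in enumerate(com): if ''.join(tup) == row_str: row_idx = idx; break" loop
def pvScan : List (Char × Char) → Nat → String → Option Nat
  | [], _, _ => none
  | t :: rest, idx, row => if String.ofList [t.1, t.2] = row then some idx else pvScan rest (idx + 1) row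

def get_tree_center_from_id (tree_id : String) (tile_size : Int) : Option Int × Option Int :=
  let row_str := PySem.Str.slice tree_id none (some 2)     -- tree_id[:2]
  let col_str := PySem.Str.slice tree_id (some 2) none     -- tree_id[2:]
  match PySem.Int.ofStr? col_str with                      -- int(col_str); ValueError → (None, None)
  | none => (none, none)
  | some col_idx =>
    match pvScan pvCom 0 row_str with
    | none => (none, none)
    | some row_idx =>
      (some (col_idx * tile_size + PySem.Int.floordiv tile_size 2),
       some ((row_idx : Int) * tile_size + PySem.Int.floordiv tile_size 2))

-- ===== PORT B =====

def get_tree_center_from_id_alt (tree_id : String) (tile_size : Int) : Option Int × Option Int :=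
  let cs := tree_id.toList
  match PySem.Int.ofChars? (cs.drop 2) with                -- int(tree_id[2:]); ValueError → (None, None)
  | none => (none, none)
  | some col_idx =>
    match cs.take 2 with                                   -- row_str = tree_id[:2]
    | [c1, c2] =>
      if 97 ≤ c1.toNat ∧ c1.toNat ≤ 122 ∧ 97 ≤ c2.toNat ∧ c2.toNat ≤ 122 then
        let row_idx : Int := ((c1.toNat : Int) - 97) * 26 + ((c2.toNat : Int) - 97)
        let half := PySem.Int.floordiv tile_size 2
        (some (col_idx * tile_size + half), some (row_idx * tile_size + half))
      else (none, none)
    | _ => (none, none)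

-- ===== PRECONDITION & SPEC =====
def Spec_get_tree_center_from_id (tree_id : String) (tile_size : Int) (out : Option Int × Option Int) : Prop := out = get_tree_center_from_id_alt tree_id tile_size
instance (tree_id : String) (tile_size : Int) (out : Option Int × Option Int) : Decidable (Spec_get_tree_center_from_id tree_id tile_size out) := by unfold Spec_get_tree_center_from_id; infer_instance

-- ===== CLAIM (what is proved, stated in full; the proofs are below) =====
def Claim_equal_get_tree_center_from_id : Prop := ∀ (tree_id : String) (tile_size : Int), Dom_get_tree_center_from_id tree_id tile_size → Spec_get_tree_center_from_id tree_id tile_size (get_tree_center_from_id tree_id tile_size)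

-- ===== LEMMAS AND PROOFS =====

theorem pvOfList_eq_iff (l : List Char) (s : String) : String.ofList l = s ↔ l = s.toList := by
  constructor
  · intro h; rw [← h, String.toList_ofList]
  · intro h; rw [h, String.ofList_toList]

theorem pvChar_toNat_inj {a b : Char} (h : a.toNat = b.toNat) : a = b := by
  apply Char.ext
  exact UInt32.toNat_inj.mp h

theorem pvAz_lit : pvAz = ['a','b','c','d','e','f','g','h','i','j','k','l','m',
    'n','o','p','q','r','s','t','u','v','w','x','y','z'] := by decide

theorem pvAz_bounds : ∀ x ∈ pvAz, 97 ≤ x.toNat ∧ x.toNat ≤ 122 := by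
  intro x hx
  rw [pvAz_lit] at hx
  fin_cases hx <;> decide

-- a stretch of pairs none of which joins to the target string is skipped over
theorem pvScan_skip (l rest : List (Char × Char)) (idx : Nat) (s : String)
    (h : ∀ t ∈ l, [t.1, t.2] ≠ s.toList) :
    pvScan (l ++ rest) idx s = pvScan rest (idx + l.length) s := by
  induction l generalizing idx with
  | nil => simp [pvScan]
  | cons t l ih =>
    have ht : ¬ (String.ofList [t.1, t.2] = s) := by
      rw [pvOfList_eq_iff]; exact h t (by simp)
    simp only [List.cons_append, pvScan, if_neg ht]
    rw [ih (idx + 1) (fun u hu => h u (by simp [hu]))]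
    congr 1
    simp [List.length_cons]
    omega

-- one block of the product, fixed first letter c1, target string [c1, c2]
theorem pvScan_block (M : List Char) (c1 c2 : Char) (rest : List (Char × Char)) (idx : Nat) :
    pvScan (M.map (fun y => (c1, y)) ++ rest) idx (String.ofList [c1, c2]) =
      match M.findIdx? (· == c2) with
      | some j => some (idx + j)
      | none => pvScan rest (idx + M.length) (String.ofList [c1, c2]) := by
  induction M generalizing idx with
  | nil => simp [pvScan, List.findIdx?_nil]
  | cons y M ih =>
    by_cases hy : y = c2
    · subst hy
      simp [pvScan, List.findIdx?_cons]
    · have hne : ¬ (String.ofList [c1, y] = String.ofList [c1, c2]) := by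
        rw [pvOfList_eq_iff, String.toList_ofList]
        simp [hy]
      have hyb : (y == c2) = false := by simp [hy]
      simp only [List.map_cons, List.cons_append, pvScan, if_neg hne]
      rw [ih (idx + 1)]
      cases h : List.findIdx? (· == c2) M with
      | none =>
        simp only [List.findIdx?_cons, hyb, h, List.length_cons, Option.map_none, cond_false]
        congr 1
        omega
      | some j =>
        simp only [List.findIdx?_cons, hyb, h, Option.map_some, cond_false]
        congr 1
        omega

theorem pvAz_findIdx (c : Char) :
    pvAz.findIdx? (· == c) =
      if 97 ≤ c.toNat ∧ c.toNat ≤ 122 then some (c.toNat - 97) else none := by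
  have hp : (fun x : Char => x == c) = (fun x : Char => x.toNat == c.toNat) := by
    funext x
    by_cases hx : x = c
    · simp [hx]
    · have hxn : x.toNat ≠ c.toNat := fun h => hx (pvChar_toNat_inj h)
      simp [hx, hxn]
  rw [hp]
  by_cases h : 97 ≤ c.toNat ∧ c.toNat ≤ 122
  · rw [if_pos h]
    obtain ⟨h1, h2⟩ := h
    generalize hn : c.toNat = n at h1 h2 ⊢
    interval_cases n <;> decide
  · rw [if_neg h]
    rw [List.findIdx?_eq_none_iff]
    intro x hx
    have hb := pvAz_bounds x hx
    simp only [beq_eq_false_iff_ne, ne_eq]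
    intro he
    exact h (he ▸ hb)

-- the whole product scan against a two-character target string
theorem pvScan_flatMap (Lx : List Char) (c1 c2 : Char) (idx : Nat) :
    pvScan (Lx.flatMap (fun x => pvAz.map (fun y => (x, y)))) idx (String.ofList [c1, c2]) =
      if 97 ≤ c2.toNat ∧ c2.toNat ≤ 122 then
        (Lx.findIdx? (· == c1)).map (fun i => idx + 26 * i + (c2.toNat - 97))
      else none := by
  induction Lx generalizing idx with
  | nil => simp [pvScan]
  | cons x L ih =>
    simp only [List.flatMap_cons]
    by_cases hx : x = c1
    · subst hx
      rw [pvScan_block]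
      rw [pvAz_findIdx c2]
      by_cases h2 : 97 ≤ c2.toNat ∧ c2.toNat ≤ 122
      · rw [if_pos h2, if_pos h2]
        simp [List.findIdx?_cons]
      · rw [if_neg h2]
        exact (ih _).trans (by rw [if_neg h2, if_neg h2])
    · have hskip : ∀ t ∈ pvAz.map (fun y => (x, y)), [t.1, t.2] ≠ (String.ofList [c1, c2]).toList := by
        intro t ht
        simp only [List.mem_map] at ht
        obtain ⟨y, _, rfl⟩ := ht
        rw [String.toList_ofList]
        simp [hx]
      rw [pvScan_skip _ _ idx _ hskip]
      have h26 : (pvAz.map (fun y => (x, y))).length = 26 := by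
        rw [List.length_map, pvAz_lit]
        rfl
      rw [h26, ih]
      have hxb : (x == c1) = false := by simp [hx]
      by_cases h2 : 97 ≤ c2.toNat ∧ c2.toNat ≤ 122
      · rw [if_pos h2, if_pos h2]
        cases h : List.findIdx? (· == c1) L with
        | none => simp [List.findIdx?_cons, hxb, h]
        | some i =>
          simp [List.findIdx?_cons, hxb, h]
          omega
      · rw [if_neg h2, if_neg h2]

theorem pvScan_short (s : String) (h : s.toList.length ≠ 2) (idx : Nat) :
    pvScan pvCom idx s = none := by
  have hrun : pvScan (pvCom ++ []) idx s = pvScan [] (idx + pvCom.length) s := by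
    apply pvScan_skip
    intro t ht hcontra
    apply h
    rw [← hcontra]
    rfl
  simpa [pvScan] using hrun

theorem pvScan_two (c1 c2 : Char) :
    pvScan pvCom 0 (String.ofList [c1, c2]) =
      if 97 ≤ c1.toNat ∧ c1.toNat ≤ 122 ∧ 97 ≤ c2.toNat ∧ c2.toNat ≤ 122 then
        some ((c1.toNat - 97) * 26 + (c2.toNat - 97))
      else none := by
  show pvScan (pvAz.flatMap (fun x => pvAz.map (fun y => (x, y)))) 0 (String.ofList [c1, c2]) = _
  rw [pvScan_flatMap, pvAz_findIdx c1]
  by_cases h1 : 97 ≤ c1.toNat ∧ c1.toNat ≤ 122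
  · by_cases h2 : 97 ≤ c2.toNat ∧ c2.toNat ≤ 122
    · rw [if_pos h2, if_pos h1, if_pos ⟨h1.1, h1.2, h2⟩]
      simp only [Option.map_some]
      congr 1
      omega
    · rw [if_neg h2, if_neg (by tauto)]
  · by_cases h2 : 97 ≤ c2.toNat ∧ c2.toNat ≤ 122
    · rw [if_pos h2, if_neg h1, if_neg (by tauto)]
      rfl
    · rw [if_neg h2, if_neg (by tauto)]

-- ===== VERDICT (by name: the statement is the Claim_ definition above) =====
theorem get_tree_center_from_id_spec : Claim_equal_get_tree_center_from_id := by
  intro tree_id tile_size _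
  unfold Spec_get_tree_center_from_id
  simp only [get_tree_center_from_id, get_tree_center_from_id_alt]
  have h2n : ((2 : Int)) = ((2 : Nat) : Int) := by norm_num
  have hcol : PySem.Int.ofStr? (PySem.Str.slice tree_id (some 2) none) =
      PySem.Int.ofChars? (tree_id.toList.drop 2) := by
    have hsl : (PySem.Str.slice tree_id (some 2) none).toList = tree_id.toList.drop 2 := by
      rw [PySem.Str.toList_slice, PySem.Chars.slice_eq_listSlice, h2n,
        PySem.List.slice_from_natCast]
    simp [PySem.Int.ofStr?, hsl]
  have hrow : (PySem.Str.slice tree_id none (some 2)).toList = tree_id.toList.take 2 := by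
    rw [PySem.Str.toList_slice, PySem.Chars.slice_eq_listSlice, h2n,
      PySem.List.slice_to_natCast]
  rw [hcol]
  cases hc : PySem.Int.ofChars? (tree_id.toList.drop 2) with
  | none => rfl
  | some col_idx =>
    cases hcs : tree_id.toList with
    | nil =>
      rw [hcs] at hrow
      rw [pvScan_short _ (by rw [hrow]; simp)]
      rfl
    | cons c1 cs1 =>
      rw [hcs] at hrow
      cases hcs1 : cs1 with
      | nil =>
        rw [hcs1] at hrow
        rw [pvScan_short _ (by rw [hrow]; simp)]
        rfl
      | cons c2 rest =>
        rw [hcs1] at hrow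
        have hrs : PySem.Str.slice tree_id none (some 2) = String.ofList [c1, c2] := by
          have hof := congrArg String.ofList hrow
          rw [String.ofList_toList] at hof
          rw [hof]
          rfl
        rw [hrs, pvScan_two]
        simp only [List.take_succ_cons, List.take_zero]
        by_cases hb : 97 ≤ c1.toNat ∧ c1.toNat ≤ 122 ∧ 97 ≤ c2.toNat ∧ c2.toNat ≤ 122
        · rw [if_pos hb, if_pos hb]
          have h1 := hb.1
          have h2 := hb.2.2.1
          have hcast : (((c1.toNat - 97) * 26 + (c2.toNat - 97) : Nat) : Int) =
              ((c1.toNat : Int) - 97) * 26 + ((c2.toNat : Int) - 97) := by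
            omega
          show (_, some ((((c1.toNat - 97) * 26 + (c2.toNat - 97) : Nat) : Int) * tile_size + PySem.Int.floordiv tile_size 2)) = _
          rw [hcast]
        · rw [if_neg hb, if_neg hb]
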